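-- pv_equiv track=rewrite | github.com/hellomc/adventofcode2025 | day5/d5.py | is_fresh
-- ===== SOURCE A (Python) =====
-- def is_fresh(ids, ranges):
--     fresh_ids = []
--
--     for id in ids:
--         for start, end in ranges:
--             if start <= id <= end:
--                 fresh_ids.append(id)
--                 break
--
--     return fresh_ids
-- ===== SOURCE B (Python) =====
-- def _bisect_right(a, x):
--     lo, hi = 0, len(a)
--     while lo < hi:
--         mid = (lo + hi) // 2
--         if x < a[mid]:
--             hi = mid
--         else:
--             lo = mid + 1
--     return lo
--
--
-- def _covered(merged, starts, x):
--     i = _bisect_right(starts, x)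
--     return bool(i) and x <= merged[i - 1][1]
--
--
-- def is_fresh(ids, ranges):
--     # merge the (start-sorted) ranges into disjoint blocks, then binary-search each id
--     merged = []
--     for s, e in sorted(ranges, key=lambda r: r[0]):
--         if merged and s <= merged[-1][1]:
--             ls, le = merged[-1]
--             merged[-1] = (ls, max(le, e))
--         else:
--             merged.append((s, e))
--     starts = [s for s, _ in merged]
--     return [id for id in ids if _covered(merged, starts, id)]
-- ===== Notes on version B (the rewrite author's own statement) =====
-- stated objective: faster
-- what changed: B sorts the ranges by start, merges them once into disjoint blocks, and tests each id with a binary search over the block starts, instead of A's linear scan of all ranges for every id.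
import Mathlib
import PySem

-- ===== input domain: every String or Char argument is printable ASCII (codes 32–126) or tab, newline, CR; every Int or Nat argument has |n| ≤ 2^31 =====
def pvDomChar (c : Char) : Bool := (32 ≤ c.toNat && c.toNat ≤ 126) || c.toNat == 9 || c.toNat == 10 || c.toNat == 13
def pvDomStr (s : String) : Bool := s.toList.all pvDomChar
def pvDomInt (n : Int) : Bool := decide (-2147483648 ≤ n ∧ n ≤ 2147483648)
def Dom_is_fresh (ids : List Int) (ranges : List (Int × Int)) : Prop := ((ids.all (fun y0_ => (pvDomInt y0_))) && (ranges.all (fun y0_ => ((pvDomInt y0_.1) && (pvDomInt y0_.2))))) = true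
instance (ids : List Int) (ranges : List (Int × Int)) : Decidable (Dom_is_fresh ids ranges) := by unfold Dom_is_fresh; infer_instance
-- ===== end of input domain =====

-- B merges the start-sorted ranges into disjoint blocks and binary-searches each id
-- (O((n+m) log m)) instead of A's linear scan of all ranges per id (O(n*m)).

-- ===== PORT A =====
-- A's inner `for start, end in ranges: … break` loop: true as soon as a range contains id.
def pvGoA (id : Int) : List (Int × Int) → Bool
  | [] => false
  | (s, e) :: rest => if s ≤ id ∧ id ≤ e then true else pvGoA id rest

def is_fresh (ids : List Int) (ranges : List (Int × Int)) : List Int :=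
  ids.foldl (fun fresh_ids id =>
    if pvGoA id ranges then fresh_ids ++ [id] else fresh_ids) []

-- ===== PORT B =====
-- Source B's merge loop; `merged[-1]` is carried separately as (cs, ce).
def pvMergeGo : List (Int × Int) → Int → Int → List (Int × Int) → List (Int × Int)
  | merged, cs, ce, [] => merged ++ [(cs, ce)]
  | merged, cs, ce, (s, e) :: rest =>
    if s ≤ ce then pvMergeGo merged cs (max ce e) rest
    else pvMergeGo (merged ++ [(cs, ce)]) s e rest

-- Source B's _covered: `i = _bisect_right(starts, x); return bool(i) and x <= merged[i-1][1]`;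
-- _bisect_right is Python's bisect_right loop = PySem.List.bisectRight; the `none` branch is
-- unreachable (i ≤ len(starts) = len(merged)), it only makes the lookup total.
def pvCovered (merged : List (Int × Int)) (starts : List Int) (x : Int) : Bool :=
  let i := PySem.List.bisectRight starts x
  if i ≠ 0 then
    match merged[i - 1]? with
    | some p => decide (x ≤ p.2)
    | none => false
  else false

def is_fresh_alt (ids : List Int) (ranges : List (Int × Int)) : List Int :=
  let merged :=
    match PySem.List.sorted ranges (fun r => r.1) with
    | [] => []
    | (s, e) :: rest => pvMergeGo [] s e rest
  let starts := merged.map (fun p => p.1)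
  ids.filter (fun id => pvCovered merged starts id)

-- ===== PRECONDITION & SPEC =====
def Spec_is_fresh (ids : List Int) (ranges : List (Int × Int)) (out : List Int) : Prop := out = is_fresh_alt ids ranges
instance (ids : List Int) (ranges : List (Int × Int)) (out : List Int) : Decidable (Spec_is_fresh ids ranges out) := by unfold Spec_is_fresh; infer_instance

-- ===== CLAIM (what is proved, stated in full; the proofs are below) =====
def Claim_equal_is_fresh : Prop := ∀ (ids : List Int) (ranges : List (Int × Int)), Dom_is_fresh ids ranges → Spec_is_fresh ids ranges (is_fresh ids ranges)

-- ===== LEMMAS AND PROOFS =====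

-- "x is contained in the range p" as a Bool.
def pvCov (x : Int) (p : Int × Int) : Bool := decide (p.1 ≤ x) && decide (x ≤ p.2)

-- A's inner loop is an existence test.
lemma pvGoA_eq_any (x : Int) (l : List (Int × Int)) : pvGoA x l = l.any (pvCov x) := by
  induction l with
  | nil => rfl
  | cons p rest ih =>
    obtain ⟨s, e⟩ := p
    by_cases h : s ≤ x ∧ x ≤ e <;> simp [pvGoA, pvCov, h, ih]

-- Merging preserves coverage, on a start-sorted remainder whose starts dominate cs.
lemma pvMergeGo_any (x : Int) (rest : List (Int × Int)) :
    ∀ merged cs ce, (∀ r ∈ rest, cs ≤ r.1) →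
    rest.Pairwise (fun a b => a.1 ≤ b.1) →
    (pvMergeGo merged cs ce rest).any (pvCov x)
      = (merged.any (pvCov x) || pvCov x (cs, ce) || rest.any (pvCov x)) := by
  induction rest with
  | nil => intro merged cs ce _ _; simp [pvMergeGo]
  | cons p rest ih =>
    obtain ⟨s, e⟩ := p
    intro merged cs ce hcs hpw
    rw [List.pairwise_cons] at hpw
    have hcs' : cs ≤ s := hcs (s, e) (by simp)
    by_cases h : s ≤ ce
    · have hmax : pvCov x (cs, max ce e) = (pvCov x (cs, ce) || pvCov x (s, e)) := by
        simp only [pvCov, ← Bool.decide_and, ← Bool.decide_or]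
        apply decide_eq_decide.mpr
        rcases le_total ce e with hce | hce
        · rw [max_eq_right hce]; omega
        · rw [max_eq_left hce]; omega
      simp only [pvMergeGo, if_pos h]
      rw [ih merged cs (max ce e) (fun r hr => hcs r (by simp [hr])) hpw.2, hmax]
      simp only [List.any_cons]
      cases merged.any (pvCov x) <;> cases pvCov x (cs, ce) <;>
        cases pvCov x (s, e) <;> cases rest.any (pvCov x) <;> rfl
    · simp only [pvMergeGo, if_neg h]
      rw [ih (merged ++ [(cs, ce)]) s e hpw.1 hpw.2]
      simp only [List.any_append, List.any_cons, List.any_nil]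
      cases merged.any (pvCov x) <;> cases pvCov x (cs, ce) <;>
        cases pvCov x (s, e) <;> cases rest.any (pvCov x) <;> rfl

-- The order/disjointness the merge maintains: earlier block starts no later and ends strictly
-- before the later block begins.
def pvS (a b : Int × Int) : Prop := a.1 ≤ b.1 ∧ a.2 < b.1

lemma pvMergeGo_pairwise (rest : List (Int × Int)) :
    ∀ merged cs ce, merged.Pairwise pvS →
    (∀ m ∈ merged, m.1 ≤ cs ∧ m.2 < cs) →
    (∀ r ∈ rest, cs ≤ r.1) →
    rest.Pairwise (fun a b => a.1 ≤ b.1) →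
    (pvMergeGo merged cs ce rest).Pairwise pvS := by
  induction rest with
  | nil =>
    intro merged cs ce hm hmc _ _
    simp only [pvMergeGo]
    refine List.pairwise_append.mpr ⟨hm, by simp, ?_⟩
    intro a ha b hb
    simp at hb; subst hb
    exact hmc a ha
  | cons p rest ih =>
    obtain ⟨s, e⟩ := p
    intro merged cs ce hm hmc hcs hpw
    rw [List.pairwise_cons] at hpw
    have hcs' : cs ≤ s := hcs (s, e) (by simp)
    by_cases h : s ≤ ce
    · simp only [pvMergeGo, if_pos h]
      exact ih merged cs (max ce e) hm hmc (fun r hr => hcs r (by simp [hr])) hpw.2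
    · simp only [pvMergeGo, if_neg h]
      refine ih (merged ++ [(cs, ce)]) s e ?_ ?_ hpw.1 hpw.2
      · refine List.pairwise_append.mpr ⟨hm, by simp, ?_⟩
        intro a ha b hb
        simp at hb; subst hb
        exact hmc a ha
      · intro m hm'
        rcases List.mem_append.mp hm' with h1 | h1
        · have := hmc m h1; exact ⟨by omega, by omega⟩
        · simp at h1; subst h1; exact ⟨hcs', by omega⟩

-- On a sorted, disjoint block list the bisect check is exactly the existence test.
lemma pvCovered_eq_any (l : List (Int × Int)) (hS : l.Pairwise pvS) (x : Int) :
    pvCovered l (l.map (fun p => p.1)) x = l.any (pvCov x) := by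
  have hsorted : (l.map (fun p => p.1)).Pairwise (fun a b => a ≤ b) :=
    List.pairwise_map.mpr (hS.imp (fun h => h.1))
  obtain ⟨hle, h2, h3⟩ := PySem.List.bisectRight_spec (l.map (fun p => p.1)) x hsorted
  simp only [List.length_map] at hle
  set i := PySem.List.bisectRight (l.map (fun p => p.1)) x with hi
  by_cases h0 : i = 0
  · rw [show pvCovered l (l.map (fun p => p.1)) x = false from by
      simp [pvCovered, ← hi, h0]]
    symm
    rw [List.any_eq_false]
    intro p hp
    obtain ⟨j, hj, hpj⟩ := List.mem_iff_getElem.mp hp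
    have := h3 j (by simpa using hj) (by omega)
    simp only [List.getElem_map] at this
    simp [pvCov, hpj ▸ this]
  · have hi1 : i - 1 < l.length := by omega
    have hstart : l[i - 1].1 ≤ x := by
      have := h2 (i - 1) (by simpa using hi1) (by omega)
      simpa using this
    simp only [pvCovered, ← hi, if_pos h0, List.getElem?_eq_getElem hi1]
    by_cases hx : x ≤ l[i - 1].2
    · simp only [hx, decide_true]
      symm
      rw [List.any_eq_true]
      exact ⟨l[i - 1], List.getElem_mem hi1, by simp [pvCov]; omega⟩
    · simp only [hx, decide_false]
      symm
      rw [List.any_eq_false]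
      intro p hp
      obtain ⟨j, hj, hpj⟩ := List.mem_iff_getElem.mp hp
      subst hpj
      rcases lt_trichotomy j (i - 1) with hlt | heq | hgt
      · have hd : pvS l[j] l[i - 1] := List.pairwise_iff_getElem.mp hS j (i - 1) hj hi1 hlt
        have hd2 := hd.2
        simp [pvCov]; intro _; omega
      · subst heq; simp [pvCov]; omega
      · have := h3 j (by simpa using hj) (by omega)
        simp only [List.getElem_map] at this
        simp [pvCov]; omega

-- per-id equality of the two tests
lemma pvTest_eq (ranges : List (Int × Int)) (x : Int) :
    pvGoA x ranges
      = (let merged :=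
           match PySem.List.sorted ranges (fun r => r.1) with
           | [] => []
           | (s, e) :: rest => pvMergeGo [] s e rest
         pvCovered merged (merged.map (fun p => p.1)) x) := by
  rw [pvGoA_eq_any]
  have hperm := (PySem.List.sorted_perm ranges (fun r => r.1) false).any_eq (f := pvCov x)
  have hpw := PySem.List.sorted_pairwise ranges (fun r => r.1)
  rcases hs : PySem.List.sorted ranges (fun r => r.1) with _ | ⟨⟨s, e⟩, rest⟩
  · simp only [hs] at hperm
    simp [pvCovered, ← hperm]
  · rw [hs] at hperm hpw
    rw [List.pairwise_cons] at hpw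
    have hmS : (pvMergeGo [] s e rest).Pairwise pvS :=
      pvMergeGo_pairwise rest [] s e (by simp) (by simp) hpw.1 hpw.2
    simp only []
    rw [pvCovered_eq_any _ hmS x,
        pvMergeGo_any x rest [] s e hpw.1 hpw.2, ← hperm]
    simp [pvCov]

-- ===== VERDICT (by name: the statement is the Claim_ definition above) =====
theorem is_fresh_spec : Claim_equal_is_fresh := by
  intro ids ranges _
  unfold Spec_is_fresh is_fresh is_fresh_alt
  rw [PySem.List.foldl_append_if (fun id => pvGoA id ranges) (fun id => id) ids []]
  simp only [List.nil_append, List.map_id']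
  apply List.filter_congr
  intro x _
  exact pvTest_eq ranges x
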